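-- pv_equiv track=rewrite | github.com/cristobalufro/encuestasarestey | process_libro.py | get_code_from_value
-- ===== SOURCE A (Python) =====
-- def get_code_from_value(value, code_map):
--     """
--     Searches for a value in the codebook and returns its corresponding code.
--     It checks both categories and combinations.
--     """
--     if value is None:
--         return None
--
--     str_value = str(value).strip().lower()
--
--     # Check in categories
--     for code, text in code_map.get("categories", {}).items():
--         if str(text).strip().lower() == str_value:
--             return int(code)
--
--     # Check in combinations
--     for code, text in code_map.get("combinations", {}).items():
--         if str(text).strip().lower() == str_value:
--             return int(code)
--
--     return value
-- ===== SOURCE B (Python) =====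
-- def get_code_from_value(value, code_map):
--     """Build one reverse-lookup index (normalized text -> code) over categories
--     then combinations, first entry wins, and answer with a single lookup."""
--     if value is None:
--         return None
--
--     str_value = str(value).strip().lower()
--
--     index = {}
--     for section in ("categories", "combinations"):
--         for code, text in code_map.get(section, {}).items():
--             key = str(text).strip().lower()
--             if key not in index:
--                 index[key] = code
--
--     code = index.get(str_value)
--     if code is None:
--         return value
--     return int(code)
-- ===== Notes on version B (the rewrite author's own statement) =====
-- stated objective: alternative
-- what changed: A runs two early-returning linear scans (categories, then combinations) converting the code at match time; B builds one reverse-lookup dict (normalized text -> code, first insertion wins) over both sections and answers with a single dict lookup.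
-- outside the precondition, e.g. on get_code_from_value('x', {}): A returns 'x', B returns 'x'
import Mathlib
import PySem

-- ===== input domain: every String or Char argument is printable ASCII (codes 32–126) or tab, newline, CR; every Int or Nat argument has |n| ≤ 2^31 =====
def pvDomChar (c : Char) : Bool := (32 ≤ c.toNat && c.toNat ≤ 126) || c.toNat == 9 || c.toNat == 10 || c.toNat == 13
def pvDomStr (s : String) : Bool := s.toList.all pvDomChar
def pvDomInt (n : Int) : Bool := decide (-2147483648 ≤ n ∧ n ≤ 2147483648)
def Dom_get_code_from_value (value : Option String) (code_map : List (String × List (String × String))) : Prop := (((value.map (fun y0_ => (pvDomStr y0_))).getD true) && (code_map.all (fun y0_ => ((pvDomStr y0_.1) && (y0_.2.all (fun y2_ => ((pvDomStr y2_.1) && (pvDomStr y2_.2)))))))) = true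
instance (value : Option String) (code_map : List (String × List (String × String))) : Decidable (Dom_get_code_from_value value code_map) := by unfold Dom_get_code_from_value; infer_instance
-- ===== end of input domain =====

-- B replaces A's two early-returning scans by one reverse-lookup dict (normalized text -> code,
-- first insertion wins) built over both sections, answered by a single lookup; alternative decomposition, same cost.


-- shared helpers (the same Python expressions occur verbatim in A and B)
-- str(x).strip().lower() — x is already a str here, so str() is the identity
def pvNorm (s : String) : String := PySem.Str.lower (PySem.Str.strip s)
-- code_map.get(name, {}) on the outer dict (assoc list, first match)
def pvGetSection (code_map : List (String × List (String × String))) (name : String) : List (String × String) :=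
  PySem.Dict.getD (PySem.Dict.mk code_map) name []

-- ===== PORT A =====
-- 'for code, text in entries: if str(text).strip().lower() == str_value: return int(code)'
-- some r = the loop returned (r = int(code); none component of r would be a ValueError, excluded by Pre_);
-- none = the loop fell through.
def pvScanA (sv : String) : List (String × String) → Option (Option Int)
  | [] => none
  | (code, text) :: rest =>
      if pvNorm text == sv then some (PySem.Int.ofStr? code) else pvScanA sv rest

def get_code_from_value (value : Option String) (code_map : List (String × List (String × String))) : Option Int :=
  match value with
  | none => none
  | some v =>
    let str_value := pvNorm v
    match pvScanA str_value (pvGetSection code_map "categories") with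
    | some r => r
    | none =>
      match pvScanA str_value (pvGetSection code_map "combinations") with
      | some r => r
      | none => none  -- Python returns `value` (a str, not an int) here: excluded by Pre_

-- ===== PORT B =====
-- inner loop of Source B: 'for code, text in …: key = …; if key not in index: index[key] = code'
def pvBuild (entries : List (String × String)) (index : PySem.Dict String String) : PySem.Dict String String :=
  entries.foldl (fun index ct =>
    let key := pvNorm ct.2
    if PySem.Dict.contains index key then index else PySem.Dict.insert index key ct.1) index

def get_code_from_value_alt (value : Option String) (code_map : List (String × List (String × String))) : Option Int :=
  match value with
  | none => none
  | some v =>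
    let str_value := pvNorm v
    let index := pvBuild (pvGetSection code_map "combinations")
                   (pvBuild (pvGetSection code_map "categories") PySem.Dict.empty)
    match PySem.Dict.get? index str_value with
    | some code => PySem.Int.ofStr? code
    | none => none  -- Python returns `value` (a str, not an int) here: excluded by Pre_

-- ===== PRECONDITION & SPEC =====
-- the first entry (categories then combinations) whose normalized text equals sv
def pvFirstCode (sv : String) (code_map : List (String × List (String × String))) : Option String :=
  ((pvGetSection code_map "categories" ++ pvGetSection code_map "combinations").find?
    (fun ct => pvNorm ct.2 == sv)).map (·.1)

-- Pre_ excludes inputs where Python A yields no int: a non-None value with no matching text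
-- (A returns the str `value`, not a value of the declared Optional[int] type — B does the same there),
-- and a match whose code is not int-parsable (A raises ValueError, as does B).
def Pre_get_code_from_value (value : Option String) (code_map : List (String × List (String × String))) : Prop :=
  (value.elim true (fun v => ((pvFirstCode (pvNorm v) code_map).bind PySem.Int.ofStr?).isSome)) = true
instance (value : Option String) (code_map : List (String × List (String × String))) : Decidable (Pre_get_code_from_value value code_map) := by unfold Pre_get_code_from_value; infer_instance

def pvWitness_get_code_from_value : Option String × (List (String × List (String × String))) :=
  (some " Yes ", [("categories", [("1", "yes"), ("2", "no")]), ("combinations", [("3", "maybe")])])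

def Spec_get_code_from_value (value : Option String) (code_map : List (String × List (String × String))) (out : Option Int) : Prop := out = get_code_from_value_alt value code_map
instance (value : Option String) (code_map : List (String × List (String × String))) (out : Option Int) : Decidable (Spec_get_code_from_value value code_map out) := by unfold Spec_get_code_from_value; infer_instance

-- ===== CLAIM (what is proved, stated in full; the proofs are below) =====
def Claim_equal_get_code_from_value : Prop := ∀ (value : Option String) (code_map : List (String × List (String × String))), Dom_get_code_from_value value code_map → Pre_get_code_from_value value code_map → Spec_get_code_from_value value code_map (get_code_from_value value code_map)

-- ===== LEMMAS AND PROOFS =====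

-- A's loop is the first match, with int() applied to its code.
theorem pvScanA_eq_find (sv : String) (entries : List (String × String)) :
    pvScanA sv entries
      = (entries.find? (fun ct => pvNorm ct.2 == sv)).map (fun ct => PySem.Int.ofStr? ct.1) := by
  induction entries with
  | nil => rfl
  | cons ct rest ih =>
    obtain ⟨code, text⟩ := ct
    by_cases h : pvNorm text == sv
    · simp [pvScanA, List.find?, h]
    · simp only [Bool.not_eq_true] at h
      simp [pvScanA, List.find?, h, ih]

-- B's insert-if-absent build: a lookup in the built index is a lookup in the start index,
-- else the first match in the entries.
theorem get?_pvBuild (entries : List (String × String)) (d : PySem.Dict String String) (sv : String) :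
    PySem.Dict.get? (pvBuild entries d) sv
      = (PySem.Dict.get? d sv).or
          ((entries.find? (fun ct => pvNorm ct.2 == sv)).map (·.1)) := by
  induction entries generalizing d with
  | nil => simp [pvBuild]
  | cons ct rest ih =>
    obtain ⟨code, text⟩ := ct
    have hstep : pvBuild ((code, text) :: rest) d
        = pvBuild rest (if PySem.Dict.contains d (pvNorm text) then d
                        else PySem.Dict.insert d (pvNorm text) code) := rfl
    rw [hstep]
    by_cases hk : pvNorm text = sv
    · subst hk
      by_cases hc : PySem.Dict.contains d (pvNorm text)
      · have hs : (PySem.Dict.get? d (pvNorm text)).isSome := by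
          rw [← PySem.Dict.contains_eq_isSome_get?]; exact hc
        obtain ⟨w, hw⟩ := Option.isSome_iff_exists.mp hs
        simp [hc, ih, List.find?, hw]
      · have hn : PySem.Dict.get? d (pvNorm text) = none := by
          rw [PySem.Dict.get?_eq_none_iff_contains]
          simpa using hc
        simp [hc, ih, List.find?, hn, PySem.Dict.get?_insert_self]
    · have hk' : (pvNorm text == sv) = false := by simpa using hk
      by_cases hc : PySem.Dict.contains d (pvNorm text)
      · simp [hc, ih, List.find?, hk']
      · have hne : sv ≠ pvNorm text := fun h => hk h.symm
        simp [hc, ih, List.find?, hk', PySem.Dict.get?_insert_of_ne _ _ hne]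

-- ===== VERDICT (by name: the statement is the Claim_ definition above) =====
theorem get_code_from_value_spec : Claim_equal_get_code_from_value := by
  intro value code_map _hDom _hPre
  unfold Spec_get_code_from_value
  cases value with
  | none => rfl
  | some v =>
    simp only [get_code_from_value, get_code_from_value_alt,
      pvScanA_eq_find, get?_pvBuild, PySem.Dict.get?_empty, Option.or]
    cases h1 : (pvGetSection code_map "categories").find? (fun ct => pvNorm ct.2 == pvNorm v) with
    | some ct => simp
    | none =>
      cases h2 : (pvGetSection code_map "combinations").find? (fun ct => pvNorm ct.2 == pvNorm v) with
      | some ct => simp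
      | none => simp
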